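-- pv_equiv track=rewrite | github.com/MiZych/wdi | laboratorium_10/zadanie_3.py | making_list
-- ===== SOURCE A (Python) =====
-- def making_list(height):
--     #1 - first_line, 2 - width_line
--     how_many = []
--     how_many.append(1)
--     for i in range(1, height * 3):
--         if i % 2 == 0 and i % 3 == 0:
--             how_many.append(1)
--         else:
--             if i % 2 == 0:
--                 how_many.append(2)
--             elif i % 3 == 0:
--                 how_many.append(1)
--     how_many.append(1)
--     return how_many
-- ===== SOURCE B (Python) =====
-- def making_list(height):
--     return [1] + ([2, 1] * height)[:-1] + [1]
-- ===== Notes on version B (the rewrite author's own statement) =====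
-- stated objective: simpler
-- what changed: Replaces the modular-arithmetic loop over a range with a one-line closed form: the output is always [1] + ([2,1]*height)[:-1] + [1].
import Mathlib
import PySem

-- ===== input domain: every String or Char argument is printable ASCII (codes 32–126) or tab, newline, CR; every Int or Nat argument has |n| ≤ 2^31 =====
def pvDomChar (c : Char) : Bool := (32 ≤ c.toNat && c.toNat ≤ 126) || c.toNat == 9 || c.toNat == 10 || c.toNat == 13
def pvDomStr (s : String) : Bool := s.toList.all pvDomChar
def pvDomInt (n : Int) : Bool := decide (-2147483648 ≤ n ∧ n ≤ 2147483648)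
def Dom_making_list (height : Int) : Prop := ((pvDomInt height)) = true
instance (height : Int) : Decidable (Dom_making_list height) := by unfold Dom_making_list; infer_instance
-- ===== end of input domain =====

-- B replaces A's modular-arithmetic loop by the closed form [1] + ([2,1]*height)[:-1] + [1] (simpler; return value only, no mutation).

-- ===== PORT A =====
-- the loop body of A, appending to how_many according to i's residues
def mlStep (acc : List Int) (i : Int) : List Int :=
  if PySem.Int.mod i 2 = 0 ∧ PySem.Int.mod i 3 = 0 then acc ++ [1]
  else if PySem.Int.mod i 2 = 0 then acc ++ [2]
  else if PySem.Int.mod i 3 = 0 then acc ++ [1]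
  else acc

def making_list (height : Int) : List Int :=
  ((PySem.List.pyRange 1 (height * 3) 1).foldl mlStep [1]) ++ [1]

-- ===== PORT B =====
-- [2,1]*height → pyRepeat; the [:-1] slice → PySem.List.slice … (some (-1)); both exact
def making_list_alt (height : Int) : List Int :=
  [1] ++ PySem.List.slice (PySem.List.pyRepeat ([2, 1] : List Int) height) none (some (-1)) ++ [1]

-- ===== PRECONDITION & SPEC =====
def Spec_making_list (height : Int) (out : List Int) : Prop := out = making_list_alt height
instance (height : Int) (out : List Int) : Decidable (Spec_making_list height out) := by unfold Spec_making_list; infer_instance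

-- ===== CLAIM (what is proved, stated in full; the proofs are below) =====
def Claim_equal_making_list : Prop := ∀ (height : Int), Dom_making_list height → Spec_making_list height (making_list height)

-- ===== LEMMAS AND PROOFS =====

lemma ml_flat_succ (k : Nat) :
    (List.replicate (k+1) ([2, 1] : List Int)).flatten =
      (List.replicate k ([2, 1] : List Int)).flatten ++ [2, 1] := by
  rw [List.replicate_succ']; simp

lemma ml_mid (n : Nat) (acc : List Int) :
    (PySem.List.pyRange 1 (3 * (n : Int)) 1).foldl mlStep acc =
      acc ++ ((List.replicate n ([2, 1] : List Int)).flatten).dropLast := by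
  induction n generalizing acc with
  | zero => simp [PySem.List.pyRange_one_eq_nil]
  | succ m ih =>
    match m with
    | 0 =>
      have hr : PySem.List.pyRange 1 (3 * ((1 : Nat) : Int)) 1 = [1, 2] := by decide
      rw [hr]
      simp [mlStep, PySem.Int.mod]
    | k + 1 =>
      have h1 : (1 : Int) ≤ 3 * ((k+1 : Nat) : Int) := by push_cast; omega
      rw [show (3 : Int) * ((k+1+1 : Nat) : Int) = 3 * ((k+1 : Nat) : Int) + 3 by
            push_cast; ring]
      set j : Int := 3 * ((k+1 : Nat) : Int) with hj
      rw [PySem.List.pyRange_one_append 1 j (j + 3) h1 (by omega),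
          List.foldl_append, ih]
      rw [PySem.List.pyRange_one_cons (by omega : j < j + 3),
          PySem.List.pyRange_one_cons (by omega : j + 1 < j + 3),
          PySem.List.pyRange_one_cons (by omega : j + 1 + 1 < j + 3),
          PySem.List.pyRange_one_eq_nil (by omega : j + 3 ≤ j + 1 + 1 + 1)]
      simp only [List.foldl_cons, List.foldl_nil]
      have hjk : j = 3 * ((k : Int) + 1) := by rw [hj]; push_cast; ring
      have d3 : (3 : Int) ∣ j := ⟨(k : Int) + 1, hjk⟩
      have n31 : ¬ (3 : Int) ∣ (j + 1) := by omega
      have n32 : ¬ (3 : Int) ∣ (j + 1 + 1) := by omega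
      -- the block i = j, j+1, j+2 appends 1 then 2, for either parity of j
      rcases Int.emod_two_eq j with hp | hp
      · have d2 : (2 : Int) ∣ j := by omega
        have n21 : ¬ (2 : Int) ∣ (j + 1) := by omega
        have d22 : (2 : Int) ∣ (j + 1 + 1) := by omega
        simp [mlStep, d3, d2, n21, d22, n31, n32, ml_flat_succ]
      · have n2 : ¬ (2 : Int) ∣ j := by omega
        have d21 : (2 : Int) ∣ (j + 1) := by omega
        have n22 : ¬ (2 : Int) ∣ (j + 1 + 1) := by omega
        simp [mlStep, d3, n2, d21, n22, n31, n32, ml_flat_succ]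

-- ===== VERDICT (by name: the statement is the Claim_ definition above) =====
theorem making_list_spec : Claim_equal_making_list := by
  intro height _
  unfold Spec_making_list making_list making_list_alt
  rw [show height * 3 = 3 * height by ring]
  rcases lt_or_ge 0 height with hpos | hle
  · have hcast : height = ((height.toNat : Nat) : Int) := (Int.toNat_of_nonneg (le_of_lt hpos)).symm
    rw [hcast, ml_mid height.toNat [1]]
    simp [PySem.List.pyRepeat, PySem.List.slice_to_neg_one]
    rw [max_eq_left hpos.le]
  · rw [PySem.List.pyRange_one_eq_nil (by omega)]
    have : PySem.List.pyRepeat ([2, 1] : List Int) height = [] := by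
      simp [PySem.List.pyRepeat, Int.toNat_of_nonpos hle]
    simp [this, PySem.List.slice_to_neg_one]
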